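-- pv_equiv track=rewrite | github.com/ElizabethF2/Miscellaneous | lincfg.py | get_rc_section
-- ===== SOURCE A (Python) =====
-- def get_rc_section(rc, name):
--   offset = 0
--   while True:
--     start = rc.find(name, offset)
--     if start < 0:
--       return None
--     if start == 0:
--       break
--     if rc[start-1] == '\n':
--       break
--     offset = start + 1
--   end = rc.find('\n[', start)
--   if end < 0:
--     return rc[start:].strip()
--   return rc[start:end-1].strip()
-- ===== SOURCE B (Python) =====
-- def get_rc_section(rc, name):
--   pos = 0
--   start = None
--   for line in rc.split('\n'):
--     if line.startswith(name):
--       start = pos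
--       break
--     pos += len(line) + 1
--   if start is None:
--     return None
--   end = rc.find('\n[', start)
--   if end < 0:
--     return rc[start:].strip()
--   return rc[start:end-1].strip()
-- ===== Notes on version B (the rewrite author's own statement) =====
-- stated objective: alternative
-- what changed: A hunts for occurrences of name with repeated rc.find(name, offset) and inspects the preceding character; B splits rc into a list of lines and walks that list with a running offset, taking the first line that startswith(name); the slicing/stripping tail is unchanged.
-- outside the precondition, e.g. on get_rc_section('a\nb', 'a\nb'): A returns 'a\nb', B returns None
import Mathlib
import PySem

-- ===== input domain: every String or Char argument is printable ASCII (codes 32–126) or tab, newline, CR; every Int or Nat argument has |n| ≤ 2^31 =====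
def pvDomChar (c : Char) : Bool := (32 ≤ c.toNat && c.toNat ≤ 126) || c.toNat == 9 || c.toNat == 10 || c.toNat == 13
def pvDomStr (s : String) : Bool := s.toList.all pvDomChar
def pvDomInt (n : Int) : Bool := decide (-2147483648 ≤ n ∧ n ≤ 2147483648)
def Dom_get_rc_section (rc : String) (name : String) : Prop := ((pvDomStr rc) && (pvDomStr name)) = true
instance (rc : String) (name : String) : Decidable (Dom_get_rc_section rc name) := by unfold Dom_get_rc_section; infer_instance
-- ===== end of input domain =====

-- B replaces A's repeated rc.find(name, offset) occurrence hunt by splitting rc into its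
-- list of lines and walking that list with a running offset; objective: alternative.

-- ===== PORT A =====

-- termination facts for A's while-loop (offset strictly grows, bounded by the length)
theorem pvFindFrom_of_gt_length (s nm : List Char) (k : Nat) (h : s.length < k) :
    PySem.Chars.findFrom s nm (k : Int) none = -1 := by
  unfold PySem.Chars.findFrom
  simp only []
  rw [if_pos (by exact_mod_cast h)]

theorem pvFindFrom_bounds (s nm : List Char) (k : Nat)
    (h : ¬ PySem.Chars.findFrom s nm (k : Int) none < 0) :
    k ≤ (PySem.Chars.findFrom s nm (k : Int) none).toNat ∧
      (PySem.Chars.findFrom s nm (k : Int) none).toNat ≤ s.length := by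
  by_cases hk : k ≤ s.length
  · rw [PySem.Chars.findFrom_natCast s nm k hk] at h ⊢
    split at h
    · omega
    · rename_i hne
      have h1 := PySem.Chars.neg_one_le_find (List.drop k s) nm
      have h2 := PySem.Chars.find_le_length (List.drop k s) nm
      rw [List.length_drop] at h2
      split <;> omega
  · exact absurd (pvFindFrom_of_gt_length s nm k (by omega)) (by omega)

-- the while-loop of A: scan occurrences of nm from offset until one sits at a line start
def pvFindA (s nm : List Char) (offset : Nat) : Option Nat :=
  let start := PySem.Chars.findFrom s nm (offset : Int) none
  if h : start < 0 then none
  else if start = 0 then some 0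
  else if PySem.List.pyGet? s (start - 1) = some '\n' then some start.toNat
  else pvFindA s nm (start.toNat + 1)
termination_by s.length + 1 - offset
decreasing_by
  have := pvFindFrom_bounds s nm offset h
  omega

def get_rc_section (rc : String) (name : String) : Option String :=
  let s := rc.toList
  match pvFindA s name.toList 0 with
  | none => none
  | some start =>
    let e := PySem.Chars.findFrom s ['\n', '['] (start : Int) none
    if e < 0 then some (String.ofList (PySem.Chars.strip (PySem.Chars.slice s (some (start : Int)) none)))
    else some (String.ofList (PySem.Chars.strip (PySem.Chars.slice s (some (start : Int)) (some (e - 1)))))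

-- ===== PORT B =====

-- Source B's for-loop over rc.split('\n'): pos is the running offset of the current line,
-- the first line with line.startswith(name) yields start = pos, exhaustion yields None
def pvFindB (lines : List (List Char)) (nm : List Char) (pos : Nat) : Option Nat :=
  match lines with
  | [] => none
  | line :: rest =>
    if PySem.Chars.startswith line nm then some pos
    else pvFindB rest nm (pos + line.length + 1)

def get_rc_section_alt (rc : String) (name : String) : Option String :=
  let s := rc.toList
  match pvFindB (PySem.Chars.splitOn s ['\n']) name.toList 0 with
  | none => none
  | some start =>
    let e := PySem.Chars.findFrom s ['\n', '['] (start : Int) none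
    if e < 0 then some (String.ofList (PySem.Chars.strip (PySem.Chars.slice s (some (start : Int)) none)))
    else some (String.ofList (PySem.Chars.strip (PySem.Chars.slice s (some (start : Int)) (some (e - 1)))))

-- ===== PRECONDITION & SPEC =====
-- Pre_ excludes only names that contain a newline AND occur in rc at a line start:
-- there A matches name across a line boundary while B, which works line by line, cannot —
-- a corner no caller of a config-section lookup exercises (section names have no newline).
def Pre_get_rc_section (rc : String) (name : String) : Prop :=
  '\n' ∉ name.toList ∨ ¬ (name.toList <+: rc.toList ∨ ('\n' :: name.toList) <:+: rc.toList)
instance (rc : String) (name : String) : Decidable (Pre_get_rc_section rc name) := by unfold Pre_get_rc_section; infer_instance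

def pvWitness_get_rc_section : String × String := ("[a]\nx=1\n[b]\ny=2", "[b]")

def Spec_get_rc_section (rc : String) (name : String) (out : Option String) : Prop := out = get_rc_section_alt rc name
instance (rc : String) (name : String) (out : Option String) : Decidable (Spec_get_rc_section rc name out) := by unfold Spec_get_rc_section; infer_instance

-- ===== CLAIM (what is proved, stated in full; the proofs are below) =====
def Claim_equal_get_rc_section : Prop := ∀ (rc : String) (name : String), Dom_get_rc_section rc name → Pre_get_rc_section rc name → Spec_get_rc_section rc name (get_rc_section rc name)

-- ===== LEMMAS AND PROOFS =====

-- the common search predicate: position i is a line start and nm is a prefix of s[i:]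
def pvP (s nm : List Char) (i : Nat) : Bool :=
  ((i == 0) || (s[i-1]? == some '\n')) && PySem.Chars.startswith (s.drop i) nm

theorem pvP_false_of_not_prefix (s nm : List Char) (i : Nat) (h : ¬ nm <+: List.drop i s) :
    pvP s nm i = false := by
  unfold pvP
  rw [Bool.and_eq_false_iff]
  refine Or.inr ?_
  simp only [Bool.not_eq_true, ← List.isPrefixOf_iff_prefix] at h
  simpa using h

theorem pvNot_infix_drop (s nm : List Char) (k i : Nat) (hk : k ≤ i)
    (h : ¬ nm <:+: List.drop k s) : ¬ nm <+: List.drop i s := by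
  intro ⟨t, ht⟩
  apply h
  have : List.drop i s = List.drop (i - k) (List.drop k s) := by
    rw [List.drop_drop]; congr 1; omega
  obtain ⟨u, hu⟩ : List.drop (i - k) (List.drop k s) <:+ List.drop k s := List.drop_suffix _ _
  exact ⟨u, t, by rw [← hu, ← this, ← ht, List.append_assoc]⟩

theorem pvFind?_congr {α : Type} (p q : α → Bool) (l : List α) (h : ∀ x ∈ l, p x = q x) :
    l.find? p = l.find? q := by
  induction l with
  | nil => rfl
  | cons a t ih =>
    have ha := h a (List.mem_cons_self)
    by_cases hp : p a = true
    · rw [List.find?_cons_of_pos hp, List.find?_cons_of_pos (ha ▸ hp)]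
    · rw [List.find?_cons_of_neg (by simpa using hp),
        List.find?_cons_of_neg (by simp [← ha]; simpa using hp)]
      exact ih (fun x hx => h x (List.mem_cons_of_mem _ hx))

theorem pvFind?_range'_none (s nm : List Char) (a m : Nat)
    (h : ∀ i, a ≤ i → i < a + m → pvP s nm i = false) :
    (List.range' a m).find? (pvP s nm) = none := by
  rw [List.find?_eq_none]
  intro i hi
  rw [List.mem_range'_1] at hi
  simp [h i hi.1 hi.2]

-- A's occurrence-scanning loop finds the first position i ≥ k satisfying pvP
theorem pvFindA_eq (s nm : List Char) :
    ∀ d k, s.length + 1 - k = d → k ≤ s.length + 1 →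
      pvFindA s nm k = (List.range' k (s.length + 1 - k)).find? (pvP s nm) := by
  intro d
  induction d using Nat.strong_induction_on with
  | _ d IH =>
    intro k hd hk
    rw [pvFindA]
    by_cases hgt : s.length < k
    · rw [dif_pos (by rw [pvFindFrom_of_gt_length s nm k hgt]; norm_num)]
      have : s.length + 1 - k = 0 := by omega
      rw [this]; rfl
    · have hkle : k ≤ s.length := by omega
      by_cases hneg : PySem.Chars.findFrom s nm (k : Int) none < 0
      · rw [dif_pos hneg]
        have hm1 : PySem.Chars.findFrom s nm (k : Int) none = -1 := by
          rw [PySem.Chars.findFrom_natCast s nm k hkle] at hneg ⊢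
          have := PySem.Chars.neg_one_le_find (List.drop k s) nm
          split at hneg
          · rename_i h; rw [if_pos h]
          · omega
        have hinf := (PySem.Chars.findFrom_natCast_eq_neg_one_iff s nm k hkle).mp hm1
        symm
        exact pvFind?_range'_none s nm k _ (fun i h1 _ =>
          pvP_false_of_not_prefix s nm i (pvNot_infix_drop s nm k i h1 hinf))
      · rw [dif_neg hneg]
        obtain ⟨hkF, hpre, hmin⟩ := PySem.Chars.findFrom_natCast_spec s nm k hkle (by omega)
        have hbnd := pvFindFrom_bounds s nm k hneg
        set F := PySem.Chars.findFrom s nm (k : Int) none with hFdef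
        have hFtn : F = (F.toNat : Int) := by omega
        -- split the range at F.toNat
        have hsplit : (List.range' k (s.length + 1 - k)).find? (pvP s nm)
            = (List.range' F.toNat (s.length + 1 - F.toNat)).find? (pvP s nm) := by
          have : List.range' k (F.toNat - k) ++ List.range' (k + 1 * (F.toNat - k)) (s.length + 1 - F.toNat)
              = List.range' k ((F.toNat - k) + (s.length + 1 - F.toNat)) := List.range'_append
          have heq : List.range' k (s.length + 1 - k)
              = List.range' k (F.toNat - k) ++ List.range' F.toNat (s.length + 1 - F.toNat) := by
            rw [show k + 1 * (F.toNat - k) = F.toNat by omega] at this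
            rw [show s.length + 1 - k = (F.toNat - k) + (s.length + 1 - F.toNat) by omega] at *
            exact this.symm
          rw [heq, List.find?_append,
            pvFind?_range'_none s nm k (F.toNat - k) (fun i h1 h2 =>
              pvP_false_of_not_prefix s nm i (hmin i h1 (by omega)))]
          rfl
        by_cases hF0 : F = 0
        · rw [if_pos hF0]
          have hk0 : k = 0 := by omega
          rw [hsplit, hF0]
          have : (0 : Int).toNat = 0 := rfl
          rw [this, show s.length + 1 - 0 = s.length + 1 from rfl,
            show List.range' 0 (s.length + 1) = 0 :: List.range' 1 s.length by
              rw [List.range'_succ]]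
          have hpre0 : nm <+: s := by simpa [hF0] using hpre
          have hP0 : pvP s nm 0 = true := by
            simp [pvP, PySem.Chars.startswith, List.isPrefixOf_iff_prefix, hpre0]
          rw [List.find?_cons_of_pos (h := hP0)]
        · rw [if_neg hF0]
          have hF1 : 1 ≤ F.toNat := by omega
          have hget : PySem.List.pyGet? s (F - 1) = s[F.toNat - 1]? := by
            rw [show F - 1 = ((F.toNat - 1 : Nat) : Int) by omega]
            exact PySem.List.pyGet?_natCast s (F.toNat - 1)
          by_cases hnl : PySem.List.pyGet? s (F - 1) = some '\n'
          · rw [if_pos hnl, hsplit]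
            rw [show List.range' F.toNat (s.length + 1 - F.toNat)
                = F.toNat :: List.range' (F.toNat + 1) (s.length - F.toNat) by
              rw [show s.length + 1 - F.toNat = (s.length - F.toNat) + 1 by omega,
                List.range'_succ]]
            rw [hget] at hnl
            have hPF : pvP s nm F.toNat = true := by
              simp [pvP, PySem.Chars.startswith, List.isPrefixOf_iff_prefix, hpre, hnl]
            rw [List.find?_cons_of_pos (h := hPF)]
          · rw [if_neg hnl]
            have hrec := IH (s.length + 1 - (F.toNat + 1)) (by omega) (F.toNat + 1) rfl (by omega)
            rw [hrec, hsplit]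
            rw [show List.range' F.toNat (s.length + 1 - F.toNat)
                = F.toNat :: List.range' (F.toNat + 1) (s.length + 1 - (F.toNat + 1)) by
              rw [show s.length + 1 - F.toNat = (s.length + 1 - (F.toNat + 1)) + 1 by omega,
                List.range'_succ]]
            rw [hget] at hnl
            have h0 : F.toNat ≠ 0 := by omega
            have hPF : pvP s nm F.toNat = false := by
              simp [pvP, hnl, h0]
            rw [List.find?_cons_of_neg (h := by simp [hPF])]

theorem pvFindA_zero (s nm : List Char) :
    pvFindA s nm 0 = (List.range (s.length + 1)).find? (pvP s nm) := by
  rw [pvFindA_eq s nm (s.length + 1) 0 rfl (by omega), Nat.sub_zero, List.range_eq_range']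

-- ---- B side: characterise splitOn by the first newline ----

-- reference splitter (proof-only): the accumulator recursion of splitOn.go on sep = "\n"
def pvGo (l cur : List Char) : List (List Char) :=
  match l with
  | [] => [cur.reverse]
  | c :: rest => if c = '\n' then cur.reverse :: pvGo rest [] else pvGo rest (c :: cur)

theorem pvSplitOn_go_eq :
    ∀ (fuel : Nat) (l cur : List Char) (acc : List (List Char)), l.length < fuel →
      PySem.Chars.splitOn.go ['\n'] fuel l cur acc = acc.reverse ++ pvGo l cur := by
  intro fuel
  induction fuel with
  | zero => intro l cur acc h; omega
  | succ n ih =>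
    intro l cur acc h
    match l with
    | [] => simp [PySem.Chars.splitOn.go, pvGo]
    | c :: rest =>
      rw [PySem.Chars.splitOn.go]
      by_cases hc : c = '\n'
      · rw [if_pos (by simp [hc, List.isPrefixOf])]
        rw [ih _ _ _ (by simp at h ⊢; omega)]
        simp [pvGo, hc]
      · rw [if_neg (by simp [List.isPrefixOf]; intro h'; exact absurd h'.symm hc)]
        rw [ih _ _ _ (by simp at h ⊢; omega)]
        simp [pvGo, hc]

theorem pvSplitOn_eq (s : List Char) : PySem.Chars.splitOn s ['\n'] = pvGo s [] := by
  unfold PySem.Chars.splitOn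
  rw [pvSplitOn_go_eq (s.length + 1) s [] [] (by omega)]
  rfl

theorem pvGo_no_nl (l : List Char) (h : '\n' ∉ l) : ∀ cur, pvGo l cur = [cur.reverse ++ l] := by
  induction l with
  | nil => intro cur; simp [pvGo]
  | cons c rest ih =>
    intro cur
    have hc : c ≠ '\n' := fun hc => h (hc ▸ List.mem_cons_self)
    rw [pvGo, if_neg hc, ih (fun hm => h (List.mem_cons_of_mem _ hm))]
    simp

theorem pvGo_append (l t : List Char) (h : '\n' ∉ l) :
    ∀ cur, pvGo (l ++ '\n' :: t) cur = (cur.reverse ++ l) :: pvGo t [] := by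
  induction l with
  | nil => intro cur; simp [pvGo]
  | cons c rest ih =>
    intro cur
    have hc : c ≠ '\n' := fun hc => h (hc ▸ List.mem_cons_self)
    rw [List.cons_append, pvGo, if_neg hc, ih (fun hm => h (List.mem_cons_of_mem _ hm))]
    simp

theorem pvExists_first_nl (s : List Char) (h : '\n' ∈ s) :
    ∃ l t, s = l ++ '\n' :: t ∧ '\n' ∉ l := by
  induction s with
  | nil => cases h
  | cons c rest ih =>
    by_cases hc : c = '\n'
    · exact ⟨[], rest, by simp [hc], by simp⟩
    · obtain ⟨l, t, heq, hnl⟩ := ih (by cases h with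
        | head => exact absurd rfl hc | tail _ hm => exact hm)
      exact ⟨c :: l, t, by simp [heq], by simp [hnl]; exact fun h' => hc h'.symm⟩

-- with '\n' ∉ nm, a prefix of l ++ '\n'::t cannot reach past l
theorem pvPrefix_iff (nm l t : List Char) (hnm : '\n' ∉ nm) :
    nm <+: (l ++ '\n' :: t) ↔ nm <+: l := by
  constructor
  · intro h
    by_cases hlen : nm.length ≤ l.length
    · have := List.prefix_iff_eq_take.mp h
      rw [List.take_append_of_le_length hlen] at this
      exact this ▸ List.take_prefix _ _
    · exfalso
      apply hnm
      have hi : l.length < nm.length := by omega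
      have h2 : nm[l.length]'hi = (l ++ '\n' :: t)[l.length]'(by simp) := h.getElem hi
      have h3 : (l ++ '\n' :: t)[l.length]'(by simp) = '\n' := by simp
      rw [h3] at h2
      exact h2 ▸ List.getElem_mem hi
  · intro h; exact h.trans (List.prefix_append l ('\n' :: t))

theorem pvP_zero (s nm : List Char) :
    pvP s nm 0 = PySem.Chars.startswith s nm := by
  simp [pvP]

-- the predicate on the suffix after the first newline, shifted by the line length
theorem pvP_shift (l t nm : List Char) (j : Nat) :
    pvP (l ++ '\n' :: t) nm (l.length + 1 + j) = pvP t nm j := by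
  unfold pvP
  have hdrop : List.drop (l.length + 1 + j) (l ++ '\n' :: t) = List.drop j t := by
    rw [List.drop_append,
      List.drop_eq_nil_of_le (as := l) (i := l.length + 1 + j) (by omega), List.nil_append,
      show l.length + 1 + j - l.length = j + 1 by omega, List.drop_succ_cons]
  rw [hdrop]
  by_cases hj : j = 0
  · subst hj
    simp
  · have h1 : (l ++ '\n' :: t)[l.length + 1 + j - 1]? = t[j - 1]? := by
      rw [show l.length + 1 + j - 1 = l.length + j by omega]
      rw [List.getElem?_append_right (by omega)]
      rw [show l.length + j - l.length = j by omega]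
      cases j with
      | zero => omega
      | succ m => simp
    rw [h1]
    have : (l.length + 1 + j == 0) = false := by simp
    have hj' : (j == 0) = false := by simp [hj]
    rw [this, hj']

-- B's line walk finds the first position satisfying pvP (offset by the running pos)
theorem pvFindB_eq (nm : List Char) (hnm : '\n' ∉ nm) :
    ∀ d (s : List Char) (k : Nat), s.length = d →
      pvFindB (pvGo s []) nm k
        = ((List.range (s.length + 1)).find? (pvP s nm)).map (fun i => k + i) := by
  intro d
  induction d using Nat.strong_induction_on with
  | _ d IH =>
    intro s k hd
    by_cases hmem : '\n' ∈ s
    · obtain ⟨l, t, heq, hl⟩ := pvExists_first_nl s hmem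
      subst heq
      rw [pvGo_append l t hl, show List.reverse ([] : List Char) ++ l = l by simp]
      have hlen : (l ++ '\n' :: t).length = l.length + 1 + t.length := by simp; omega
      -- split the search range at l.length + 1
      have hrange : List.range ((l ++ '\n' :: t).length + 1)
          = List.range' 0 (l.length + 1) ++ List.range' (l.length + 1) (t.length + 1) := by
        rw [List.range_eq_range', hlen]
        have := List.range'_append (s := 0) (m := l.length + 1) (n := t.length + 1) (step := 1)
        rw [show 0 + 1 * (l.length + 1) = l.length + 1 by omega] at this
        rw [show l.length + 1 + t.length + 1 = (l.length + 1) + (t.length + 1) by omega]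
        exact this.symm
      rw [hrange, List.find?_append]
      by_cases hsw : PySem.Chars.startswith l nm = true
      · -- the very first line matches: both sides give k
        rw [pvFindB, if_pos hsw]
        have hP0 : pvP (l ++ '\n' :: t) nm 0 = true := by
          rw [pvP_zero]
          rw [PySem.Chars.startswith_iff] at hsw ⊢
          exact (pvPrefix_iff nm l t hnm).mpr hsw
        rw [show List.range' 0 (l.length + 1) = 0 :: List.range' 1 l.length from List.range'_succ .., 
          List.find?_cons_of_pos (h := hP0)]
        simp
      · rw [pvFindB, if_neg hsw]
        -- no position in the first line matches
        have hnone : (List.range' 0 (l.length + 1)).find? (pvP (l ++ '\n' :: t) nm) = none := by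
          apply pvFind?_range'_none
          intro i h0 hi
          by_cases hi0 : i = 0
          · subst hi0
            rw [pvP_zero]
            rw [Bool.eq_false_iff]
            intro hc
            rw [PySem.Chars.startswith_iff, pvPrefix_iff nm l t hnm,
              ← PySem.Chars.startswith_iff] at hc
            exact hsw hc
          · unfold pvP
            have h1 : (l ++ '\n' :: t)[i - 1]? = some l[i-1] := by
              rw [List.getElem?_append_left (by omega)]
              exact List.getElem?_eq_getElem (by omega)
            have h2 : l[i-1]'(by omega) ≠ '\n' := fun hc => hl (hc ▸ List.getElem_mem _)
            rw [Bool.and_eq_false_iff]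
            left
            simp [hi0, h1, h2]
        rw [hnone, Option.none_or]
        -- the second block is the search on t, shifted
        have hIH := IH t.length (by simp at hd; omega) t (k + l.length + 1) rfl
        rw [hIH]
        have hmap : (List.range' (l.length + 1) (t.length + 1)).find? (pvP (l ++ '\n' :: t) nm)
            = ((List.range (t.length + 1)).find? (pvP t nm)).map (fun j => l.length + 1 + j) := by
          rw [List.range'_eq_map_range, List.find?_map,
            pvFind?_congr (pvP (l ++ '\n' :: t) nm ∘ fun x => l.length + 1 + x) (pvP t nm)
              (List.range (t.length + 1)) (fun j _ => pvP_shift l t nm j)]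
        rw [hmap]
        cases (List.range (t.length + 1)).find? (pvP t nm) with
        | none => rfl
        | some j => simp; omega
    · rw [pvGo_no_nl s hmem [], show List.reverse ([] : List Char) ++ s = s by simp]
      rw [pvFindB]
      by_cases hsw : PySem.Chars.startswith s nm = true
      · rw [if_pos hsw]
        have hP0 : pvP s nm 0 = true := by rw [pvP_zero]; exact hsw
        rw [List.range_eq_range',
          show List.range' 0 (s.length + 1) = 0 :: List.range' 1 s.length from List.range'_succ ..,
          List.find?_cons_of_pos (h := hP0)]
        simp
      · rw [if_neg hsw]
        have hnone : (List.range (s.length + 1)).find? (pvP s nm) = none := by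
          rw [List.range_eq_range']
          apply pvFind?_range'_none
          intro i h0 hi
          by_cases hi0 : i = 0
          · subst hi0; rw [pvP_zero]; simpa using hsw
          · unfold pvP
            have h1 : s[i - 1]? = some (s[i-1]'(by omega)) := List.getElem?_eq_getElem (by omega)
            have h2 : s[i-1]'(by omega) ≠ '\n' := fun hc => hmem (hc ▸ List.getElem_mem _)
            rw [Bool.and_eq_false_iff]
            left
            simp [hi0, h1, h2]
        rw [hnone]
        rfl

-- every line produced by the splitter is newline-free
theorem pvGo_no_nl_mem (s : List Char) :
    ∀ cur, '\n' ∉ cur → ∀ x ∈ pvGo s cur, '\n' ∉ x := by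
  induction s with
  | nil =>
    intro cur hcur x hx
    simp [pvGo] at hx
    subst hx; simpa using hcur
  | cons c rest ih =>
    intro cur hcur x hx
    rw [pvGo] at hx
    by_cases hc : c = '\n'
    · rw [if_pos hc] at hx
      rcases List.mem_cons.mp hx with h | h
      · subst h; simpa using hcur
      · exact ih [] (by simp) x h
    · rw [if_neg hc] at hx
      exact ih (c :: cur) (by simp [hcur]; exact fun h => hc h.symm) x hx

-- a name containing a newline never matches any line
theorem pvFindB_none (lines : List (List Char)) (nm : List Char) (hmem : '\n' ∈ nm)
    (h : ∀ x ∈ lines, '\n' ∉ x) : ∀ k, pvFindB lines nm k = none := by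
  induction lines with
  | nil => intro k; rfl
  | cons line rest ih =>
    intro k
    rw [pvFindB, if_neg, ih (fun x hx => h x (List.mem_cons_of_mem _ hx))]
    intro hsw
    exact h line List.mem_cons_self ((PySem.Chars.startswith_iff _ _).mp hsw |>.mem hmem)

-- if name occurs nowhere at a line start, A's scan comes up empty
theorem pvFindA_none (s nm : List Char)
    (h : ¬ (nm <+: s ∨ ('\n' :: nm) <:+: s)) : pvFindA s nm 0 = none := by
  rw [pvFindA_zero, List.find?_eq_none]
  intro i _
  rw [Bool.not_eq_true]
  unfold pvP
  rw [Bool.and_eq_false_iff]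
  by_cases hpre : nm <+: List.drop i s
  · left
    rw [Bool.or_eq_false_iff]
    constructor
    · simp only [beq_eq_false_iff_ne, ne_eq]
      intro hi0
      exact h (Or.inl (by simpa [hi0] using hpre))
    · simp only [beq_eq_false_iff_ne, ne_eq]
      intro hnl
      apply h
      right
      have hi1 : i - 1 < s.length := by
        by_contra hge
        rw [List.getElem?_eq_none (by omega)] at hnl
        cases hnl
      have hi0 : i ≠ 0 := by
        intro h0
        subst h0
        exact h (Or.inl (by simpa using hpre))
      have hdrop : List.drop (i - 1) s = '\n' :: List.drop i s := by
        rw [List.drop_eq_getElem_cons hi1, show i - 1 + 1 = i by omega]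
        congr 1
        have := List.getElem?_eq_getElem hi1
        rw [this] at hnl
        exact Option.some.inj hnl
      have hp : ('\n' :: nm) <+: List.drop (i - 1) s := by
        rw [hdrop]
        exact List.cons_prefix_cons.mpr ⟨rfl, hpre⟩
      exact hp.isInfix.trans (List.drop_suffix _ _).isInfix
  · right
    rw [Bool.eq_false_iff]
    intro hc
    exact hpre ((PySem.Chars.startswith_iff _ _).mp hc)

theorem pvFindB_zero (s nm : List Char) (hnm : '\n' ∉ nm) :
    pvFindB (pvGo s []) nm 0 = (List.range (s.length + 1)).find? (pvP s nm) := by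
  rw [pvFindB_eq nm hnm s.length s 0 rfl]
  cases (List.range (s.length + 1)).find? (pvP s nm) with
  | none => rfl
  | some i => simp

-- ===== VERDICT (by name: the statement is the Claim_ definition above) =====
theorem get_rc_section_spec : Claim_equal_get_rc_section := by
  intro rc name _ hpre
  unfold Spec_get_rc_section get_rc_section get_rc_section_alt
  by_cases hnm : '\n' ∈ name.toList
  · have hocc : ¬ (name.toList <+: rc.toList ∨ ('\n' :: name.toList) <:+: rc.toList) := by
      cases hpre with
      | inl h => exact absurd hnm h
      | inr h => exact h
    simp only [pvSplitOn_eq, pvFindA_none rc.toList name.toList hocc,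
      pvFindB_none (pvGo rc.toList []) name.toList hnm
        (pvGo_no_nl_mem rc.toList [] (by simp)) 0]
  · simp only [pvSplitOn_eq, pvFindB_zero rc.toList name.toList hnm, pvFindA_zero]
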